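-- pv_equiv track=rewrite | github.com/moehein-92/Computing-in-Python | f23.py | sortString
-- ===== SOURCE A (Python) =====
-- def sortString(a_string):
--     lw_string = ""
--     up_string = ""
--     punct = ""
--     spaces = 0
--     if isinstance(a_string, str):
--         for i in a_string:
--             if ord(i)<= 122 and ord(i) >=97:
--                 lw_string = lw_string + i
--
--             if ord(i)<= 90 and ord(i) >=65:
--                 up_string = up_string + i
--
--             if ord(i)<= 64 and ord(i) >=33:
--                 punct = punct + i
--
--             if ord(i) == 32:
--                 spaces += 1
--         combined = up_string +"\n"+lw_string+"\n"+punct+"\n"+str(spaces)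
--         return combined
--     else:
--         return "Not a string!"
-- ===== SOURCE B (Python) =====
-- def sortString(a_string):
--     if isinstance(a_string, str):
--         up = ''.join(c for c in a_string if 'A' <= c <= 'Z')
--         lw = ''.join(c for c in a_string if 'a' <= c <= 'z')
--         punct = ''.join(c for c in a_string if 33 <= ord(c) <= 64)
--         spaces = a_string.count(' ')
--         return up + "\n" + lw + "\n" + punct + "\n" + str(spaces)
--     else:
--         return "Not a string!"
-- ===== Notes on version B (the rewrite author's own statement) =====
-- stated objective: idiomatic
-- what changed: Replaced the single loop threading four mutable accumulators by four independent filter/count passes (one per category) joined at the end.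
import Mathlib
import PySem

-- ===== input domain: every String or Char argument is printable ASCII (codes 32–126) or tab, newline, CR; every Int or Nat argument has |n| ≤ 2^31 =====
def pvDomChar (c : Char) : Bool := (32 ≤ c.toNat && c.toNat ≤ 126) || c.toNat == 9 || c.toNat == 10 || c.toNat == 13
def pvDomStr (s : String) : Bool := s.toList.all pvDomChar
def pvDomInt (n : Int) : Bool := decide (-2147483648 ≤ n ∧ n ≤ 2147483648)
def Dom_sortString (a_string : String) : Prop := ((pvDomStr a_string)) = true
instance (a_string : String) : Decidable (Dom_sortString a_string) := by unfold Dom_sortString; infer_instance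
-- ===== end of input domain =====

-- B replaces A's single loop over four mutable accumulators by four independent filter/count passes (idiomatic; same cost).

-- ===== PORT A =====
-- one pass; state = (lw_string, up_string, punct, spaces), each branch in A's order
def sortString (a_string : String) : String :=
  let st := a_string.toList.foldl
    (fun (st : List Char × List Char × List Char × Int) i =>
      let lw := if i.toNat ≤ 122 ∧ 97 ≤ i.toNat then st.1 ++ [i] else st.1
      let up := if i.toNat ≤ 90 ∧ 65 ≤ i.toNat then st.2.1 ++ [i] else st.2.1
      let pu := if i.toNat ≤ 64 ∧ 33 ≤ i.toNat then st.2.2.1 ++ [i] else st.2.2.1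
      let sp := if i.toNat = 32 then st.2.2.2 + 1 else st.2.2.2
      (lw, up, pu, sp))
    ([], [], [], 0)
  String.ofList (st.2.1 ++ '\n' :: st.1 ++ '\n' :: st.2.2.1 ++ '\n' :: (PySem.Int.toStr st.2.2.2).toList)

-- ===== PORT B =====
-- four independent passes: three filters and one count
def sortString_alt (a_string : String) : String :=
  let cs := a_string.toList
  let up := cs.filter (fun c => decide ('A' ≤ c ∧ c ≤ 'Z'))
  let lw := cs.filter (fun c => decide ('a' ≤ c ∧ c ≤ 'z'))
  let pu := cs.filter (fun c => decide (33 ≤ c.toNat ∧ c.toNat ≤ 64))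
  let sp : Int := cs.count ' '
  String.ofList (up ++ '\n' :: lw ++ '\n' :: pu ++ '\n' :: (PySem.Int.toStr sp).toList)

-- ===== PRECONDITION & SPEC =====
def Spec_sortString (a_string : String) (out : String) : Prop := out = sortString_alt a_string
instance (a_string : String) (out : String) : Decidable (Spec_sortString a_string out) := by unfold Spec_sortString; infer_instance

-- ===== CLAIM (what is proved, stated in full; the proofs are below) =====
def Claim_equal_sortString : Prop := ∀ (a_string : String), Dom_sortString a_string → Spec_sortString a_string (sortString a_string)

-- ===== LEMMAS AND PROOFS =====
theorem sortString_fold_inv (cs lw up pu : List Char) (sp : Int) :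
    cs.foldl
      (fun (st : List Char × List Char × List Char × Int) i =>
        let lw := if i.toNat ≤ 122 ∧ 97 ≤ i.toNat then st.1 ++ [i] else st.1
        let up := if i.toNat ≤ 90 ∧ 65 ≤ i.toNat then st.2.1 ++ [i] else st.2.1
        let pu := if i.toNat ≤ 64 ∧ 33 ≤ i.toNat then st.2.2.1 ++ [i] else st.2.2.1
        let sp := if i.toNat = 32 then st.2.2.2 + 1 else st.2.2.2
        (lw, up, pu, sp))
      (lw, up, pu, sp)
    = (lw ++ cs.filter (fun c => decide ('a' ≤ c ∧ c ≤ 'z')),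
       up ++ cs.filter (fun c => decide ('A' ≤ c ∧ c ≤ 'Z')),
       pu ++ cs.filter (fun c => decide (33 ≤ c.toNat ∧ c.toNat ≤ 64)),
       sp + (cs.count ' ' : Int)) := by
  induction cs generalizing lw up pu sp with
  | nil => simp
  | cons c cs ih =>
    simp only [List.foldl_cons, List.filter_cons, List.count_cons, ih]
    have hle : ('a' ≤ c ∧ c ≤ 'z') ↔ (c.toNat ≤ 122 ∧ 97 ≤ c.toNat) := by
      constructor <;> intro ⟨h1, h2⟩ <;>
        exact ⟨by simpa [Char.le_def] using h2, by simpa [Char.le_def] using h1⟩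
    have hup : ('A' ≤ c ∧ c ≤ 'Z') ↔ (c.toNat ≤ 90 ∧ 65 ≤ c.toNat) := by
      constructor <;> intro ⟨h1, h2⟩ <;>
        exact ⟨by simpa [Char.le_def] using h2, by simpa [Char.le_def] using h1⟩
    have hpu : (33 ≤ c.toNat ∧ c.toNat ≤ 64) ↔ (c.toNat ≤ 64 ∧ 33 ≤ c.toNat) := by tauto
    have hsp : (c = ' ') ↔ (c.toNat = 32) := by
      constructor
      · rintro rfl; rfl
      · intro h; exact Char.ext (by simpa using congrArg UInt32.ofNat h)
    by_cases h1 : c.toNat ≤ 122 ∧ 97 ≤ c.toNat <;>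
    by_cases h2 : c.toNat ≤ 90 ∧ 65 ≤ c.toNat <;>
    by_cases h3 : c.toNat ≤ 64 ∧ 33 ≤ c.toNat <;>
    by_cases h4 : c.toNat = 32 <;>
      simp [h1, h2, h3, h4, hle, hup, hpu, hsp, beq_iff_eq] <;> omega

-- ===== VERDICT (by name: the statement is the Claim_ definition above) =====
theorem sortString_spec : Claim_equal_sortString := by
  intro s _
  unfold Spec_sortString sortString sortString_alt
  simp only [sortString_fold_inv, List.nil_append, zero_add]
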